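-- pv_equiv track=rewrite | github.com/trilu/lupito-content | stage_aadf_data_v2.py | detect_form
-- ===== SOURCE A (Python) =====
-- def detect_form(text: str) -> str:
--     """Detect food form from text"""
--     text_lower = str(text).lower()
--
--     if 'freeze' in text_lower and 'dried' in text_lower:
--         return 'freeze_dried'
--     elif 'raw' in text_lower and ('frozen' in text_lower or 'fresh' in text_lower):
--         return 'raw'
--     elif any(w in text_lower for w in ['can', 'tin', 'pouch', 'tray', 'wet']):
--         return 'wet'
--     elif any(w in text_lower for w in ['kibble', 'dry', 'biscuit', 'pellet']):
--         return 'dry'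
--
--     return 'unknown'
-- ===== SOURCE B (Python) =====
-- # Different algorithm: one left-to-right scan over text positions collecting ALL
-- # matched keywords into a set, then a separate classification stage over that set
-- # (A instead runs 15 independent substring searches inside an if/elif cascade).
-- _KEYWORDS = ('freeze', 'dried', 'raw', 'frozen', 'fresh',
--              'can', 'tin', 'pouch', 'tray', 'wet',
--              'kibble', 'dry', 'biscuit', 'pellet')
--
-- def detect_form(text: str) -> str:
--     t = str(text).lower()
--     found = set()
--     for i in range(len(t)):
--         for w in _KEYWORDS:
--             if w not in found and t.startswith(w, i):
--                 found.add(w)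
--     if 'freeze' in found and 'dried' in found:
--         return 'freeze_dried'
--     if 'raw' in found and ('frozen' in found or 'fresh' in found):
--         return 'raw'
--     if any(w in found for w in ('can', 'tin', 'pouch', 'tray', 'wet')):
--         return 'wet'
--     if any(w in found for w in ('kibble', 'dry', 'biscuit', 'pellet')):
--         return 'dry'
--     return 'unknown'
-- ===== Notes on version B (the rewrite author's own statement) =====
-- stated objective: alternative
-- what changed: Replaced A's if/elif cascade of 15 independent substring searches by a two-stage algorithm: one scan over text positions that collects every matched keyword into a set, followed by a separate classification stage reading only that set.
import Mathlib
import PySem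

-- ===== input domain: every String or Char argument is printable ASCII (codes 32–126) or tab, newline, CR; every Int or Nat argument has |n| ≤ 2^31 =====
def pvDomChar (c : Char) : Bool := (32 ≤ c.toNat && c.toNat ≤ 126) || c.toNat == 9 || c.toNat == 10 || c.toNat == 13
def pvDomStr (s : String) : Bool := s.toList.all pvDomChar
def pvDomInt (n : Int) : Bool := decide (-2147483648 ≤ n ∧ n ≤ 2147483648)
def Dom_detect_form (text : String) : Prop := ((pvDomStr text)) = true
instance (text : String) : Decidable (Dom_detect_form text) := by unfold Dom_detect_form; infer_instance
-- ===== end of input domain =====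

-- B replaces A's if/elif cascade of independent substring searches with a two-stage
-- algorithm: one scan over text positions collecting all matched keywords into a set,
-- then a classification stage reading only that set (objective: alternative).

-- ===== PORT A =====
def detect_form (text : String) : String :=
  let text_lower := PySem.Str.lower text
  if PySem.Str.isIn "freeze" text_lower && PySem.Str.isIn "dried" text_lower then "freeze_dried"
  else if PySem.Str.isIn "raw" text_lower &&
      (PySem.Str.isIn "frozen" text_lower || PySem.Str.isIn "fresh" text_lower) then "raw"
  else if (["can", "tin", "pouch", "tray", "wet"] : List String).any
      (fun w => PySem.Str.isIn w text_lower) then "wet"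
  else if (["kibble", "dry", "biscuit", "pellet"] : List String).any
      (fun w => PySem.Str.isIn w text_lower) then "dry"
  else "unknown"

-- ===== PORT B =====
def pvKeywords : List String :=
  ["freeze", "dried", "raw", "frozen", "fresh",
   "can", "tin", "pouch", "tray", "wet",
   "kibble", "dry", "biscuit", "pellet"]

-- one position of the scan: try every keyword at the current suffix (Python's inner for-loop)
def pvStepPos (suf : List Char) (found : List String) : List String :=
  pvKeywords.foldl
    (fun acc w =>
      if !acc.contains w && PySem.Chars.startswith suf w.toList then acc ++ [w] else acc)
    found

-- the outer for-loop over i in range(len(t)): suffix t.drop i stands for position i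
def pvScan : List Char → List String → List String
  | [], found => found
  | c :: rest, found => pvScan rest (pvStepPos (c :: rest) found)

def detect_form_alt (text : String) : String :=
  let found := pvScan (PySem.Str.lower text).toList []
  if found.contains "freeze" && found.contains "dried" then "freeze_dried"
  else if found.contains "raw" && (found.contains "frozen" || found.contains "fresh") then "raw"
  else if (["can", "tin", "pouch", "tray", "wet"] : List String).any
      (fun w => found.contains w) then "wet"
  else if (["kibble", "dry", "biscuit", "pellet"] : List String).any
      (fun w => found.contains w) then "dry"
  else "unknown"

-- ===== PRECONDITION & SPEC =====
def Spec_detect_form (text : String) (out : String) : Prop := out = detect_form_alt text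
instance (text : String) (out : String) : Decidable (Spec_detect_form text out) := by unfold Spec_detect_form; infer_instance

-- ===== CLAIM =====
def Claim_equal_detect_form : Prop := ∀ (text : String), Dom_detect_form text → Spec_detect_form text (detect_form text)

-- ===== LEMMAS AND PROOFS =====

theorem contains_pvStepPos (suf : List Char) (found : List String) (v : String) :
    (pvStepPos suf found).contains v =
      (found.contains v || (pvKeywords.contains v && PySem.Chars.startswith suf v.toList)) := by
  have h : ∀ (ws : List String) (acc : List String),
      (ws.foldl (fun acc w =>
        if !acc.contains w && PySem.Chars.startswith suf w.toList then acc ++ [w] else acc)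
        acc).contains v =
      (acc.contains v || (ws.contains v && PySem.Chars.startswith suf v.toList)) := by
    intro ws
    induction ws with
    | nil => intro acc; simp
    | cons w rest ih =>
      intro acc
      simp only [List.foldl_cons, ih, List.contains_cons]
      by_cases hacc : v ∈ acc
      · by_cases hvw : v = w
        · subst hvw; simp [hacc]
        · have hbeq : (v == w) = false := by simp [hvw]
          split_ifs <;> simp [hacc, hvw, hbeq]
      · by_cases hvw : v = w
        · subst hvw
          by_cases hs : PySem.Chars.startswith suf v.toList = true
          · simp [hacc, hs]
          · simp only [Bool.not_eq_true] at hs; simp [hacc, hs]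
        · have hbeq : (v == w) = false := by simp [hvw]
          split_ifs <;> simp [hacc, hvw, hbeq]
  exact h pvKeywords found

theorem contains_pvScan (s : List Char) (found : List String) (v : String)
    (hv : pvKeywords.contains v = true) :
    ((pvScan s found).contains v = true ↔
      found.contains v = true ∨ ∃ j, v.toList <+: s.drop j) := by
  induction s generalizing found with
  | nil =>
    simp only [pvScan, List.drop_nil]
    constructor
    · intro h; exact Or.inl h
    · rintro (h | ⟨j, hj⟩)
      · exact h
      · exfalso
        have hnil : v.toList = [] := List.prefix_nil.mp hj
        have hmem : v ∈ pvKeywords := by simpa using hv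
        fin_cases hmem <;> simp_all [pvKeywords]
  | cons c rest ih =>
    simp only [pvScan]
    rw [ih]
    simp only [contains_pvStepPos, hv, Bool.true_and, Bool.or_eq_true]
    constructor
    · rintro ((h | h) | ⟨j, hj⟩)
      · exact Or.inl h
      · exact Or.inr ⟨0, by simpa [PySem.Chars.startswith_iff] using h⟩
      · exact Or.inr ⟨j + 1, by simpa using hj⟩
    · rintro (h | ⟨j, hj⟩)
      · exact Or.inl (Or.inl h)
      · cases j with
        | zero => exact Or.inl (Or.inr (by simpa [PySem.Chars.startswith_iff] using hj))
        | succ j => exact Or.inr ⟨j, by simpa using hj⟩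

theorem contains_eq_isIn (t : String) (v : String)
    (hv : pvKeywords.contains v = true) :
    (pvScan t.toList []).contains v = PySem.Str.isIn v t := by
  by_cases h : PySem.Str.isIn v t = true
  · rw [h]
    rcases (PySem.Str.isIn_iff_infix (sub := v) (s := t)).mp h with ⟨pre, post, hsplit⟩
    refine (contains_pvScan t.toList [] v hv).mpr (Or.inr ⟨pre.length, ?_⟩)
    rw [← hsplit, List.append_assoc, List.drop_left]
    exact List.prefix_append _ _
  · simp only [Bool.not_eq_true] at h
    rw [h, Bool.eq_false_iff]
    intro hc
    rcases (contains_pvScan t.toList [] v hv).mp hc with h' | ⟨j, post, hpost⟩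
    · simp at h'
    · have : PySem.Str.isIn v t = true := by
        rw [PySem.Str.isIn_iff_infix]
        exact ⟨t.toList.take j, post, by rw [List.append_assoc, hpost, List.take_append_drop]⟩
      rw [this] at h
      exact absurd h (by simp)

-- ===== VERDICT =====
theorem detect_form_spec : Claim_equal_detect_form := by
  intro text _
  unfold Spec_detect_form detect_form detect_form_alt
  have h := fun v hv => contains_eq_isIn (PySem.Str.lower text) v hv
  simp only [List.any_cons, List.any_nil, Bool.or_false]
  rw [h "freeze" (by decide), h "dried" (by decide), h "raw" (by decide),
    h "frozen" (by decide), h "fresh" (by decide), h "can" (by decide),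
    h "tin" (by decide), h "pouch" (by decide), h "tray" (by decide),
    h "wet" (by decide), h "kibble" (by decide), h "dry" (by decide),
    h "biscuit" (by decide), h "pellet" (by decide)]
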